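-- pv_equiv track=rewrite | github.com/Logic-1729/CS2205-Lexer | verify_dot.py | expand_label
-- ===== SOURCE A (Python) =====
-- def expand_single_label(token: str):
--     """展开单个子标签为字符集合"""
--     chars = set()
--     if token.startswith("[") and token.endswith("]"):
--         # 处理字符集
--         content = token[1:-1]
--         i = 0
--         while i < len(content):
--             if i + 2 < len(content) and content[i + 1] == "-":
--                 # 范围，如 a-z
--                 start, end = content[i], content[i + 2]
--                 chars.update(chr(c) for c in range(ord(start), ord(end) + 1))
--                 i += 3
--             else:
--                 chars.add(content[i])
--                 i += 1
--     else:
--         # 普通字符串，逐字符展开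
--         chars.update(token)
--     return chars
--
-- def expand_label(label: str):
--     """
--     支持逗号分隔的多个子标签，例如 "[0-9],[a-y],z"
--     """
--     chars = set()
--     # 去掉可能的引号
--     label = label.strip('"')
--     # 按逗号分割
--     parts = [part.strip() for part in label.split(",")]
--     for part in parts:
--         if part:
--             chars.update(expand_single_label(part))
--     return chars
-- ===== SOURCE B (Python) =====
-- def _ivals(s):
--     """Compile a bracket body into a list of (lo, hi) code-point intervals,
--     by structural recursion on the remaining suffix."""
--     if len(s) >= 3 and s[1] == "-":
--         return [(ord(s[0]), ord(s[2]))] + _ivals(s[3:])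
--     if s:
--         return [(ord(s[0]), ord(s[0]))] + _ivals(s[1:])
--     return []
--
-- def _part_ivals(part):
--     if part.startswith("[") and part.endswith("]"):
--         return _ivals(part[1:-1])
--     return [(ord(c), ord(c)) for c in part]
--
-- def expand_label(label):
--     ivs = [iv for raw in label.strip('"').split(",")
--               for iv in _part_ivals(raw.strip())]
--     return {chr(k) for lo, hi in ivs for k in range(lo, hi + 1)}
-- ===== Notes on version B (the rewrite author's own statement) =====
-- stated objective: alternative
-- what changed: B compiles the label into a flat intermediate list of (lo,hi) code-point intervals -- bracket bodies via structural recursion on the suffix, plain parts as degenerate per-char intervals -- then materializes the character set once with a single nested comprehension, instead of A's index while-loop that unions characters into a per-part set merged into an outer set.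
import Mathlib
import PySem

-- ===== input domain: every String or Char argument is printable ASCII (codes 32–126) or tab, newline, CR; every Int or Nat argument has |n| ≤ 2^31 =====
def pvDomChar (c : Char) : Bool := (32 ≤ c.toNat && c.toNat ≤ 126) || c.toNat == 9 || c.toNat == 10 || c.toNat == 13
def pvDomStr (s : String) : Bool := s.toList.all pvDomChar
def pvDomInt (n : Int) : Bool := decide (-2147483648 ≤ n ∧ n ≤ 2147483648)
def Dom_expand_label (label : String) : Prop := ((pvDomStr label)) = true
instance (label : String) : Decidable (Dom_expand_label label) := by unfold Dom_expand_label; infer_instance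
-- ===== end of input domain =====

-- B compiles the whole label into a flat list of (lo, hi) code-point intervals (an
-- intermediate representation, by structural recursion) and materializes the set once,
-- instead of A's index while-loop unioning characters into nested sets; objective:
-- alternative (same cost, different intermediate data structure).

-- ===== PORT A =====
-- while-loop of expand_single_label over the bracket content (index i)
def expandLoopA (content : List Char) (i : Nat) (chars : PySem.Set Char) : PySem.Set Char :=
  if _h : i < content.length then
    if i + 2 < content.length ∧ content.getD (i + 1) ' ' = '-' then
      expandLoopA content (i + 3)
        (PySem.Set.update chars
          ((PySem.List.pyRange ((content.getD i ' ').toNat : Int)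
              (((content.getD (i + 2) ' ').toNat : Int) + 1) 1).map
            (fun c => Char.ofNat c.toNat)))
    else
      expandLoopA content (i + 1) (PySem.Set.add chars (content.getD i ' '))
  else chars
termination_by content.length - i
decreasing_by all_goals omega

def expandSingleLabel (token : List Char) : PySem.Set Char :=
  if PySem.Chars.startswith token ['['] && PySem.Chars.endswith token [']'] then
    expandLoopA (PySem.List.slice token (some 1) (some (-1))) 0 PySem.Set.empty
  else
    PySem.Set.update PySem.Set.empty token

def expand_label (label : String) : List String :=
  (((PySem.Chars.splitOn (PySem.Chars.stripChars label.toList ['"']) [',']).map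
      (fun p => PySem.Chars.strip p)).foldl
    (fun chars part =>
      if part ≠ [] then PySem.Set.update chars (expandSingleLabel part) else chars)
    PySem.Set.empty).map (fun c => String.ofList [c])

-- ===== PORT B =====
-- _ivals: compile a bracket body to (lo, hi) intervals, recursion on the suffix
def ivalsB : List Char → List (Int × Int)
  | a :: b :: c :: rest =>
      if b = '-' then ((a.toNat : Int), (c.toNat : Int)) :: ivalsB rest
      else ((a.toNat : Int), (a.toNat : Int)) :: ivalsB (b :: c :: rest)
  | a :: rest => ((a.toNat : Int), (a.toNat : Int)) :: ivalsB rest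
  | [] => []
termination_by l => l.length

-- _part_ivals
def partIvalsB (part : List Char) : List (Int × Int) :=
  if PySem.Chars.startswith part ['['] && PySem.Chars.endswith part [']'] then
    ivalsB (PySem.List.slice part (some 1) (some (-1)))
  else
    part.map (fun c => ((c.toNat : Int), (c.toNat : Int)))

def expand_label_alt (label : String) : List String :=
  let ivs :=
    (PySem.Chars.splitOn (PySem.Chars.stripChars label.toList ['"']) [',']).flatMap
      (fun raw => partIvalsB (PySem.Chars.strip raw))
  (PySem.Set.ofList
      (ivs.flatMap (fun p =>
        (PySem.List.pyRange p.1 (p.2 + 1) 1).map (fun k => Char.ofNat k.toNat)))).map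
    (fun c => String.ofList [c])

-- ===== PRECONDITION & SPEC =====
def Spec_expand_label (label : String) (out : List String) : Prop := out = expand_label_alt label
instance (label : String) (out : List String) : Decidable (Spec_expand_label label out) := by unfold Spec_expand_label; infer_instance

-- ===== CLAIM (what is proved, stated in full; the proofs are below) =====
def Claim_equal_expand_label : Prop := ∀ (label : String), Dom_expand_label label → Spec_expand_label label (expand_label label)

-- ===== LEMMAS AND PROOFS =====

-- the characters one interval contributes to B's stream
def expandIv (p : Int × Int) : List Char :=
  (PySem.List.pyRange p.1 (p.2 + 1) 1).map (fun k => Char.ofNat k.toNat)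

theorem expandIv_single (c : Char) :
    expandIv ((c.toNat : Int), (c.toNat : Int)) = [c] := by
  simp [expandIv, PySem.List.pyRange_one, List.range_succ]

theorem map_flatMap_expandIv (l : List Char) :
    (l.map (fun c => ((c.toNat : Int), (c.toNat : Int)))).flatMap expandIv = l := by
  induction l with
  | nil => rfl
  | cons c cs ih => simp [List.flatMap_cons, expandIv_single, ih]

theorem set_update_append {α : Type} [BEq α] (s : PySem.Set α) (xs ys : List α) :
    PySem.Set.update s (xs ++ ys) = PySem.Set.update (PySem.Set.update s xs) ys := by
  simp [PySem.Set.update, List.foldl_append]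

theorem set_update_singleton {α : Type} [BEq α] (s : PySem.Set α) (x : α) :
    PySem.Set.update s [x] = PySem.Set.add s x := rfl

theorem set_update_add {α : Type} [BEq α] [LawfulBEq α] (s t : PySem.Set α) (x : α) :
    PySem.Set.update s (PySem.Set.add t x) = PySem.Set.add (PySem.Set.update s t) x := by
  by_cases hx : x ∈ t
  · rw [PySem.Set.add_of_mem hx,
      PySem.Set.add_of_mem ((PySem.Set.mem_update _ _ _).mpr (Or.inr hx))]
  · rw [PySem.Set.add_of_not_mem hx, set_update_append, set_update_singleton]

theorem set_update_ofList {α : Type} [BEq α] [LawfulBEq α] (s : PySem.Set α) (xs : List α) :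
    PySem.Set.update s (PySem.Set.ofList xs) = PySem.Set.update s xs := by
  induction xs using List.reverseRecOn with
  | nil => rfl
  | append_singleton xs x ih =>
      have h1 : PySem.Set.ofList (xs ++ [x]) = PySem.Set.add (PySem.Set.ofList xs) x := by
        simp [PySem.Set.ofList_eq_foldl, List.foldl_append]
      rw [h1, set_update_add, ih, set_update_append, set_update_singleton]

theorem set_update_cons {α : Type} [BEq α] (s : PySem.Set α) (x : α) (xs : List α) :
    PySem.Set.update s (x :: xs) = PySem.Set.update (PySem.Set.add s x) xs := rfl

theorem ivalsB_range (a c : Char) (rest : List Char) :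
    ivalsB (a :: '-' :: c :: rest) =
      ((a.toNat : Int), (c.toNat : Int)) :: ivalsB rest := by
  simp [ivalsB]

theorem ivalsB_drop_step (content : List Char) (i : Nat) (hi : i < content.length)
    (hg : ¬ (i + 2 < content.length ∧ content.getD (i + 1) ' ' = '-')) :
    ivalsB (content.drop i) =
      (((content.getD i ' ').toNat : Int), ((content.getD i ' ').toNat : Int)) ::
        ivalsB (content.drop (i + 1)) := by
  rw [List.getD_eq_getElem _ _ hi]
  rw [List.drop_eq_getElem_cons hi]
  rcases h2 : content.drop (i + 1) with _ | ⟨b, _ | ⟨c, rest⟩⟩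
  · simp [ivalsB]
  · simp [ivalsB]
  · have hlen : i + 2 < content.length := by
      have := congrArg List.length h2
      simp [List.length_drop] at this
      omega
    have hi1 : i + 1 < content.length := by omega
    have hb : b = content[i + 1] := by
      rw [List.drop_eq_getElem_cons hi1] at h2
      exact (List.cons.injEq _ _ _ _ ▸ h2).1.symm
    have hbne : b ≠ '-' := by
      intro hcontr
      exact hg ⟨hlen, by rw [List.getD_eq_getElem _ _ hi1, ← hb, hcontr]⟩
    simp [ivalsB, hbne]

theorem expandLoopA_eq_ivals (content : List Char) (i : Nat) (chars : PySem.Set Char) :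
    expandLoopA content i chars =
      PySem.Set.update chars ((ivalsB (content.drop i)).flatMap expandIv) := by
  induction i, chars using expandLoopA.induct (content := content) with
  | case1 i chars hlt hg ih =>
      rw [expandLoopA, dif_pos hlt, if_pos hg, ih]
      obtain ⟨h2, hdash⟩ := hg
      have h1 : i + 1 < content.length := by omega
      have e0 : content.drop i = content[i] :: content.drop (i + 1) :=
        List.drop_eq_getElem_cons hlt
      have e1 : content.drop (i + 1) = content[i + 1] :: content.drop (i + 2) :=
        List.drop_eq_getElem_cons h1
      have e2 : content.drop (i + 2) = content[i + 2] :: content.drop (i + 3) :=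
        List.drop_eq_getElem_cons h2
      have hd : content[i + 1] = '-' := by
        rw [← List.getD_eq_getElem content ' ' h1]; exact hdash
      have eiv : ivalsB (content.drop i) =
          (((content.getD i ' ').toNat : Int), ((content.getD (i + 2) ' ').toNat : Int)) ::
            ivalsB (content.drop (i + 3)) := by
        rw [List.getD_eq_getElem _ _ hlt, List.getD_eq_getElem _ _ h2]
        have e : content.drop i =
            content[i] :: '-' :: content[i + 2] :: content.drop (i + 3) := by
          rw [e0, e1, e2, hd]
        rw [e, ivalsB_range]
      rw [eiv, List.flatMap_cons]
      have hexp : expandIv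
            (((content.getD i ' ').toNat : Int), ((content.getD (i + 2) ' ').toNat : Int)) =
          (PySem.List.pyRange (((content.getD i ' ').toNat : Int))
            (((content.getD (i + 2) ' ').toNat : Int) + 1) 1).map
            (fun k => Char.ofNat k.toNat) := rfl
      rw [hexp, set_update_append]
  | case2 i chars hlt hg ih =>
      rw [expandLoopA, dif_pos hlt, if_neg hg, ih, ivalsB_drop_step content i hlt hg]
      rw [List.flatMap_cons, expandIv_single, List.singleton_append, set_update_cons]
  | case3 i chars hge =>
      rw [expandLoopA, dif_neg hge, List.drop_eq_nil_of_le (by omega)]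
      simp [ivalsB]

theorem expandSingleLabel_eq (part : List Char) (_hne : part ≠ []) :
    expandSingleLabel part =
      PySem.Set.update PySem.Set.empty ((partIvalsB part).flatMap expandIv) := by
  unfold expandSingleLabel partIvalsB
  by_cases hbr : (PySem.Chars.startswith part ['['] && PySem.Chars.endswith part [']']) = true
  · rw [if_pos hbr, if_pos hbr, expandLoopA_eq_ivals, List.drop_zero]
  · rw [if_neg hbr, if_neg hbr, map_flatMap_expandIv]

theorem foldA_eq (parts : List (List Char)) (s : PySem.Set Char) :
    parts.foldl
      (fun chars part =>
        if part ≠ [] then PySem.Set.update chars (expandSingleLabel part) else chars) s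
      = PySem.Set.update s ((parts.flatMap partIvalsB).flatMap expandIv) := by
  induction parts generalizing s with
  | nil => rfl
  | cons p ps ih =>
      rw [List.foldl_cons, List.flatMap_cons, List.flatMap_append, set_update_append, ih]
      congr 1
      by_cases hp : p = []
      · subst hp
        simp [partIvalsB, PySem.Chars.startswith]
      · rw [if_pos hp, expandSingleLabel_eq p hp]
        have : PySem.Set.update PySem.Set.empty ((partIvalsB p).flatMap expandIv)
            = PySem.Set.ofList ((partIvalsB p).flatMap expandIv) := rfl
        rw [this, set_update_ofList]

-- ===== VERDICT (by name: the statement is the Claim_ definition above) =====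
theorem expand_label_spec : Claim_equal_expand_label := by
  intro label _
  unfold Spec_expand_label expand_label expand_label_alt
  rw [foldA_eq, List.flatMap_map]
  rfl
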